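-- pv_equiv track=rewrite | github.com/stat-thon/Coding-Test-Study-2nd | Yen/프로그래머스/2레벨/덧칠하기.py | solution
-- ===== SOURCE A (Python) =====
-- from collections import deque
--
-- def solution(n, m, section):
--     answer = 0
--     q=deque(section)
--     while q :
--         x=q.popleft()
--         while q and q[0] < x+m :
--             q.popleft()
--         answer +=1
--
--     return answer
-- ===== SOURCE B (Python) =====
-- def solution(n, m, section):
--     answer = 0
--     end = None
--     for x in section:
--         if end is None or x > end:
--             answer += 1
--             end = x + m - 1
--     return answer
-- ===== Notes on version B (the rewrite author's own statement) =====
-- stated objective: simpler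
-- what changed: The deque-draining nested while-loops become one flat forward scan that keeps only the right edge of the current stroke in a variable; elements inside the edge are skipped instead of being popped in an inner loop.
import Mathlib
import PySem

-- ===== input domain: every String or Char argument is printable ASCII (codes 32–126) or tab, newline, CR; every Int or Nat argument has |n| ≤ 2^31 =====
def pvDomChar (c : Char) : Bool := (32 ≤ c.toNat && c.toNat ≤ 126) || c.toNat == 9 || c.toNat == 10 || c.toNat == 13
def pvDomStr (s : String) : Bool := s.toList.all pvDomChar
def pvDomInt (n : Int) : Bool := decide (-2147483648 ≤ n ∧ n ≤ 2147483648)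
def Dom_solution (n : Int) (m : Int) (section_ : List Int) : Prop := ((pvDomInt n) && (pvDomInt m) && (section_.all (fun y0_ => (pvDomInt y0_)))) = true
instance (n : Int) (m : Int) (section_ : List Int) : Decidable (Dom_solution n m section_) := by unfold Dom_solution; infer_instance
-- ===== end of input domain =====

-- B replaces A's deque with nested pop-loops by a single flat scan tracking the
-- current stroke's right edge in a variable (simpler decomposition, same cost).


-- ===== PORT A =====
-- inner `while q and q[0] < x+m: q.popleft()`
def solutionDrain (bound : Int) : List Int → List Int
  | [] => []
  | y :: ys => if y < bound then solutionDrain bound ys else y :: ys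

theorem solutionDrain_length (bound : Int) (q : List Int) :
    (solutionDrain bound q).length ≤ q.length := by
  induction q with
  | nil => simp [solutionDrain]
  | cons y ys ih =>
    simp only [solutionDrain]
    split
    · exact Nat.le_succ_of_le ih
    · simp

-- outer `while q:` loop, state (q, answer)
def solutionOuter (m : Int) : List Int → Int → Int
  | [], answer => answer
  | x :: q, answer => solutionOuter m (solutionDrain (x + m) q) (answer + 1)
termination_by q => q.length
decreasing_by
  simpa using Nat.lt_succ_of_le (solutionDrain_length (x + m) q)

def solution (n : Int) (m : Int) (section_ : List Int) : Int :=
  solutionOuter m section_ 0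

-- ===== PORT B =====
-- single forward scan with `end` (None / some right edge)
def solutionAltLoop (m : Int) : List Int → Int → Option Int → Int
  | [], answer, _ => answer
  | x :: xs, answer, e? =>
    match e? with
    | none => solutionAltLoop m xs (answer + 1) (some (x + m - 1))
    | some e =>
      if x > e then solutionAltLoop m xs (answer + 1) (some (x + m - 1))
      else solutionAltLoop m xs answer (some e)

def solution_alt (n : Int) (m : Int) (section_ : List Int) : Int :=
  solutionAltLoop m section_ 0 none

-- ===== PRECONDITION & SPEC =====
def Spec_solution (n : Int) (m : Int) (section_ : List Int) (out : Int) : Prop := out = solution_alt n m section_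
instance (n : Int) (m : Int) (section_ : List Int) (out : Int) : Decidable (Spec_solution n m section_ out) := by unfold Spec_solution; infer_instance

-- ===== CLAIM (what is proved, stated in full; the proofs are below) =====
def Claim_equal_solution : Prop := ∀ (n : Int) (m : Int) (section_ : List Int), Dom_solution n m section_ → Spec_solution n m section_ (solution n m section_)

-- ===== LEMMAS AND PROOFS =====

-- B's scan with edge `b - 1` equals A's outer loop on the drained queue.
theorem solutionAlt_drain (m : Int) (q : List Int) :
    ∀ (a b : Int), solutionAltLoop m q a (some (b - 1)) = solutionOuter m (solutionDrain b q) a := by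
  induction q with
  | nil => intro a b; simp [solutionAltLoop, solutionDrain, solutionOuter]
  | cons y ys ih =>
    intro a b
    by_cases h : y < b
    · have h' : ¬ (y > b - 1) := by omega
      simp only [solutionAltLoop, solutionDrain, h, if_pos, h', if_neg, not_false_iff]
      exact ih a b
    · have h' : y > b - 1 := by omega
      simp only [solutionAltLoop, solutionDrain, h, if_neg, h', if_pos, not_false_iff]
      have : (y + m - 1) = (y + m) - 1 := by ring
      rw [this, ih (a + 1) (y + m)]
      conv_rhs => rw [solutionOuter]

theorem solutionAlt_eq (m : Int) (q : List Int) (a : Int) :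
    solutionAltLoop m q a none = solutionOuter m q a := by
  cases q with
  | nil => simp [solutionAltLoop, solutionOuter]
  | cons x xs =>
    simp only [solutionAltLoop, solutionOuter]
    have : (x + m - 1) = (x + m) - 1 := by ring
    rw [this, solutionAlt_drain m xs (a + 1) (x + m)]

-- ===== VERDICT (by name: the statement is the Claim_ definition above) =====
theorem solution_spec : Claim_equal_solution := by
  intro n m section_ _
  unfold Spec_solution solution solution_alt
  exact (solutionAlt_eq m section_ 0).symm
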